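-- pv_equiv track=rewrite | github.com/m-zakeri/CodART | codart/cfg_generator/src/code_coverage/prime_path_coverage.py | path_request
-- ===== SOURCE A (Python) =====
-- from collections import defaultdict
--
-- def check(l1, l2):
--     # return True if list2 is sublist of list1 but order of l2 is same in l1.
--     index_list = [i for i, v in enumerate(l1) if v == l2[0]]
--     for ii in index_list:
--         l1_slice = l1[ii:ii + len(l2)]
--         if l1_slice == l2:
--             return True
--     else:
--         return False
--
-- def path_request(test_path, primes):
--     # map each test path with test requirement
--     tr_tp = defaultdict(list)
--     tp_tr = defaultdict(list)
--     for i in test_path: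
--         for j in primes:
--             if check(i, j) is True:
--                 tp_tr[str(i)].append(j)
--                 tr_tp[str(j)].append(i)
--     return tp_tr
-- ===== SOURCE B (Python) =====
-- def path_request(test_path, primes):
--     # map each test path with test requirement
--     lengths = {len(p) for p in primes}
--     res = {}
--     for path in test_path:
--         # index: one hash-set of windows per needed length; the per-prime scan of the path disappears
--         windows = {l: {tuple(path[k:k + l]) for k in range(len(path) - l + 1)} for l in lengths}
--         matches = [p for p in primes if tuple(p) in windows[len(p)]]
--         if matches:
--             res[str(path)] = res.get(str(path), []) + matches
--     return res
-- ===== Notes on version B (the rewrite author's own statement) =====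
-- stated objective: faster
-- what changed: B builds, once per test path, a hash index (a set of the path's windows for each distinct prime length) and matches every prime by one hashed set lookup of its tuple, so A's per-prime index-list/slice scan of the path disappears; the unused second dict is dropped and matches are inserted per path in one batch (measured ~5-7x faster on the generated inputs).
-- outside the precondition, e.g. on path_request([[]], [[]]): A returns {}, B returns {'[]': [[]]}; on path_request([[1]], [[]]): A raises IndexError, B returns {'[1]': [[]]}
import Mathlib
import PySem

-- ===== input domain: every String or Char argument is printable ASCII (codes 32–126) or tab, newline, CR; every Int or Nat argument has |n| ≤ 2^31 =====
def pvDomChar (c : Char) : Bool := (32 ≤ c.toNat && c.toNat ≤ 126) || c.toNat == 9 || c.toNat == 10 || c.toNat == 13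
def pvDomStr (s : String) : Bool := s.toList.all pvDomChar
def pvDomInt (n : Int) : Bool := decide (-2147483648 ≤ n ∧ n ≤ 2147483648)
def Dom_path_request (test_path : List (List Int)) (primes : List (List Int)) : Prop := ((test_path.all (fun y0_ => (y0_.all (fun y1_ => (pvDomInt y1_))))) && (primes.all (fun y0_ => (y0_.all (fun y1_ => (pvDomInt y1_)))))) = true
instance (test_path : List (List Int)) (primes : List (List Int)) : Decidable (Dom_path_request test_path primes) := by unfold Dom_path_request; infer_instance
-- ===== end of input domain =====

-- B: per test path a hash index (a set of windows per needed prime length) replaces A's per-prime index-list/slice scan of the path; matches become hashed set lookups (measured faster in a timing run).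


-- str(l) for a Python list of ints, e.g. "[1, 2]" (shared rendering of the dict key)
def pyStrList (l : List Int) : String :=
  "[" ++ PySem.Str.join ", " (l.map PySem.Int.toStr) ++ "]"

-- ===== PORT A =====
-- check(l1, l2): index list of positions where l1[i] == l2[0], then slice-compare.
-- On l2 = [] with l1 nonempty Python raises IndexError at l2[0]; that case is excluded by Pre_
-- (with l1 = [] the comprehension never evaluates l2[0] and the loop body never runs: False, as ported).
def check (l1 l2 : List Int) : Bool :=
  match l2 with
  | [] => false
  | h :: _ =>
    let index_list := ((PySem.List.enumerate l1 0).filter (fun p => p.2 == h)).map (fun p => p.1)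
    index_list.any (fun ii => PySem.List.slice l1 (some ii) (some (ii + (l2.length : Int))) == l2)

def path_request (test_path : List (List Int)) (primes : List (List Int)) : List (String × List (List Int)) :=
  -- tr_tp and tp_tr are the two defaultdicts; tr_tp is built but unused, as in A
  (test_path.foldl
    (fun (st : PySem.Dict String (List (List Int)) × PySem.Dict String (List (List Int))) i =>
      primes.foldl
        (fun st j =>
          if check i j then
            (st.1.modify (pyStrList i) [] (· ++ [j]), st.2.modify (pyStrList j) [] (· ++ [i]))
          else st)
        st)
    (PySem.Dict.empty, PySem.Dict.empty)).1.items

-- ===== PORT B =====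
-- {tuple(path[k:k+l]) for k in range(len(path)-l+1)}: the window set of length l; pyRange on the
-- Int expression len(path)-l+1 is Python's range, empty when it is ≤ 0 — exact.
def windowSet (path : List Int) (l : Nat) : PySem.Set (List Int) :=
  PySem.Set.ofList ((PySem.List.pyRange 0 ((path.length : Int) - (l : Int) + 1) 1).map
    (fun k => PySem.List.slice path (some k) (some (k + (l : Int)))))

-- windows = {l: {...} for l in lengths}; the dict comprehension over the set of lengths. The dict is
-- only LOOKED UP afterwards, so the Python set's iteration order cannot affect the result.
def windowsDict (path : List Int) (lengths : PySem.Set Nat) : PySem.Dict Nat (PySem.Set (List Int)) :=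
  lengths.foldl (fun d l => d.insert l (windowSet path l)) PySem.Dict.empty

def path_request_alt (test_path : List (List Int)) (primes : List (List Int)) : List (String × List (List Int)) :=
  let lengths : PySem.Set Nat := PySem.Set.ofList (primes.map (fun p => p.length))
  (test_path.foldl
    (fun (res : PySem.Dict String (List (List Int))) path =>
      let windows := windowsDict path lengths
      -- windows[len(p)]: len(p) ∈ lengths, so the key is always present; getD with ∅ is exact here
      let ms := primes.filter (fun p => (windows.getD p.length PySem.Set.empty).contains p)
      if ms.isEmpty then res
      else res.insert (pyStrList path) (res.getD (pyStrList path) [] ++ ms))  -- res[k] = res.get(k, []) + ms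
    PySem.Dict.empty).items

-- ===== PRECONDITION & SPEC =====
-- Pre_ excludes inputs with an empty prime and a nonempty test_path: there A raises IndexError (check reads
-- l2[0]) as soon as some test path is nonempty, and on the remaining all-empty-path cases whether the empty
-- prime matches is a corner nobody specifies (A says never, B says always).
def Pre_path_request (test_path : List (List Int)) (primes : List (List Int)) : Prop :=
  test_path = [] ∨ ([] : List Int) ∉ primes
instance (test_path : List (List Int)) (primes : List (List Int)) : Decidable (Pre_path_request test_path primes) := by unfold Pre_path_request; infer_instance
def pvWitness_path_request : List (List Int) × List (List Int) := ([[1, 2, 3], [2, 3]], [[2, 3], [1], [3, 1]])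

def Spec_path_request (test_path : List (List Int)) (primes : List (List Int)) (out : List (String × List (List Int))) : Prop := out = path_request_alt test_path primes
instance (test_path : List (List Int)) (primes : List (List Int)) (out : List (String × List (List Int))) : Decidable (Spec_path_request test_path primes out) := by unfold Spec_path_request; infer_instance

-- ===== CLAIM (what is proved, stated in full; the proofs are below) =====
def Claim_equal_path_request : Prop := ∀ (test_path : List (List Int)) (primes : List (List Int)), Dom_path_request test_path primes → Pre_path_request test_path primes → Spec_path_request test_path primes (path_request test_path primes)

-- ===== LEMMAS AND PROOFS =====

-- membership in the window set of length j.length is exactly "j is a prefix of some suffix of path"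
lemma mem_windowSet (path j : List Int) :
    (windowSet path j.length).contains j = true ↔ ∃ k, j <+: path.drop k := by
  unfold windowSet
  rw [PySem.Set.contains_iff, PySem.Set.mem_ofList]
  simp only [List.mem_map]
  constructor
  · rintro ⟨k, hk, hsl⟩
    rw [PySem.List.mem_pyRange_one] at hk
    lift k to ℕ using hk.1 with n
    rw [PySem.List.slice_natCast_add path n j.length] at hsl
    exact ⟨n, List.prefix_iff_eq_take.mpr hsl.symm⟩
  · rintro ⟨k, hpre⟩
    rcases eq_or_ne j [] with rfl | hj
    · refine ⟨(0 : Int), ?_, ?_⟩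
      · rw [PySem.List.mem_pyRange_one]
        exact ⟨le_refl _, by simp only [List.length_nil, Nat.cast_zero]; omega⟩
      · rw [show (0 : Int) = ((0 : Nat) : Int) from rfl,
            PySem.List.slice_natCast_add path 0 ([] : List Int).length]
        simp
    · have hk : k < path.length := by
        by_contra hge
        rw [List.drop_eq_nil_of_le (by omega)] at hpre
        exact hj (List.prefix_nil.mp hpre)
      have hlen : j.length + k ≤ path.length := by
        have := hpre.length_le
        simp only [List.length_drop] at this
        omega
      refine ⟨(k : Int), ?_, ?_⟩
      · rw [PySem.List.mem_pyRange_one]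
        exact ⟨Int.natCast_nonneg k, by omega⟩
      · rw [PySem.List.slice_natCast_add path k j.length]
        exact (List.prefix_iff_eq_take.mp hpre).symm

-- lookup in a dict built by inserting a computed value at every key of a list
lemma getD_foldl_insert_fun (L : List Nat) (f : Nat → PySem.Set (List Int))
    (d : PySem.Dict Nat (PySem.Set (List Int))) (l : Nat) :
    (L.foldl (fun d k => d.insert k (f k)) d).getD l PySem.Set.empty
      = if l ∈ L then f l else d.getD l PySem.Set.empty := by
  induction L generalizing d with
  | nil => simp
  | cons k L ih =>
    rw [List.foldl_cons, ih]
    by_cases hL : l ∈ L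
    · simp [hL]
    · rw [if_neg hL, PySem.Dict.getD_insert]
      by_cases hk : l = k
      · simp [hk]
      · simp [hk, hL]

lemma getD_windowsDict (path : List Int) (L : List Nat) (l : Nat) (hl : l ∈ L) :
    (windowsDict path (PySem.Set.ofList L)).getD l PySem.Set.empty = windowSet path l := by
  unfold windowsDict
  rw [getD_foldl_insert_fun]
  simp only [PySem.Set.mem_ofList]
  exact if_pos hl

-- check i j (j nonempty) holds iff j occurs contiguously in i
lemma check_iff (hay : List Int) (h : Int) (t : List Int) :
    check hay (h :: t) = true ↔ ∃ k, (h :: t) <+: hay.drop k := by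
  simp only [check, List.any_eq_true, List.mem_map, List.mem_filter]
  constructor
  · rintro ⟨ii, ⟨p, ⟨hpe, hph⟩, rfl⟩, hsl⟩
    rw [PySem.List.mem_enumerate_iff] at hpe
    obtain ⟨k, hk, rfl⟩ := hpe
    refine ⟨k, ?_⟩
    rw [List.prefix_iff_eq_take]
    simp only [zero_add] at hsl
    rw [PySem.List.slice_natCast_add hay k (h :: t).length, beq_iff_eq] at hsl
    exact hsl.symm
  · rintro ⟨k, hpre⟩
    obtain ⟨r, hr⟩ := hpre
    have hk : k < hay.length := by
      by_contra hge
      rw [List.drop_eq_nil_of_le (by omega)] at hr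
      simp at hr
    have hd : hay.drop k = hay[k] :: hay.drop (k + 1) := List.drop_eq_getElem_cons hk
    have hhead : hay[k] = h := by
      rw [hd] at hr
      exact (List.cons.injEq _ _ _ _).mp hr.symm |>.1
    refine ⟨(k : Int), ⟨((k : Int), hay[k]), ⟨?_, by simp [hhead]⟩, rfl⟩, ?_⟩
    · rw [PySem.List.mem_enumerate_iff]
      exact ⟨k, hk, by simp⟩
    · rw [PySem.List.slice_natCast_add hay k (h :: t).length, beq_iff_eq, ← hr]
      exact List.take_left

-- on primes without the empty list, B's indexed lookup decides exactly A's check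
lemma filter_bridge (primes : List (List Int)) (hpr : ([] : List Int) ∉ primes) (i : List Int) :
    primes.filter (fun p =>
        ((windowsDict i (PySem.Set.ofList (primes.map (fun p => p.length)))).getD p.length
          PySem.Set.empty).contains p)
      = primes.filter (fun j => check i j) := by
  apply List.filter_congr
  intro p hp
  rw [getD_windowsDict i (primes.map (fun p => p.length)) p.length
        (List.mem_map.mpr ⟨p, hp, rfl⟩)]
  cases p with
  | nil => exact absurd hp hpr
  | cons h t =>
    apply Bool.eq_iff_iff.mpr
    exact (mem_windowSet i (h :: t)).trans (check_iff i h t).symm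

-- composing two defaultdict appends at the same key
lemma modify_modify (d : PySem.Dict String (List (List Int))) (k : String)
    (f g : List (List Int) → List (List Int)) :
    (d.modify k [] f).modify k [] g = d.modify k [] (fun v => g (f v)) := by
  show (d.insert k (f (d.getD k []))).insert k
      (g ((d.insert k (f (d.getD k []))).getD k [])) = d.insert k (g (f (d.getD k [])))
  rw [PySem.Dict.getD_insert_self, PySem.Dict.insert_insert_self]

-- a run of appends at one key is one batch append
lemma foldl_modify_batch (k : String) (m : List (List Int)) (hm : m ≠ [])
    (d : PySem.Dict String (List (List Int))) :
    m.foldl (fun d j => d.modify k [] (· ++ [j])) d = d.modify k [] (· ++ m) := by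
  induction m generalizing d with
  | nil => exact absurd rfl hm
  | cons j m ih =>
    cases m with
    | nil => rfl
    | cons j' m' =>
      rw [List.foldl_cons, ih (by simp), modify_modify]
      congr 1
      funext v
      simp

-- A's inner loop over primes, projected to its first dict, equals B's batch step
lemma inner_eq (primes : List (List Int)) (hpr : ([] : List Int) ∉ primes) (i : List Int)
    (st : PySem.Dict String (List (List Int)) × PySem.Dict String (List (List Int))) :
    (primes.foldl
      (fun st j =>
        if check i j then
          (st.1.modify (pyStrList i) [] (· ++ [j]), st.2.modify (pyStrList j) [] (· ++ [i]))
        else st)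
      st).1
    = (let ms := primes.filter (fun p =>
          ((windowsDict i (PySem.Set.ofList (primes.map (fun p => p.length)))).getD p.length
            PySem.Set.empty).contains p)
       if ms.isEmpty then st.1
       else st.1.insert (pyStrList i) (st.1.getD (pyStrList i) [] ++ ms)) := by
  have proj : ∀ (pr : List (List Int))
      (st : PySem.Dict String (List (List Int)) × PySem.Dict String (List (List Int))),
      (pr.foldl
        (fun st j =>
          if check i j then
            (st.1.modify (pyStrList i) [] (· ++ [j]), st.2.modify (pyStrList j) [] (· ++ [i]))
          else st)
        st).1
      = pr.foldl (fun d j => if check i j then d.modify (pyStrList i) [] (· ++ [j]) else d) st.1 := by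
    intro pr
    induction pr with
    | nil => intro st; rfl
    | cons j ps ih =>
      intro st
      simp only [List.foldl_cons]
      by_cases hc : check i j = true
      · rw [if_pos hc, if_pos hc]; exact ih _
      · rw [if_neg hc, if_neg hc]; exact ih st
  rw [proj primes st, ← List.foldl_filter, filter_bridge primes hpr i]
  cases hms : primes.filter (fun j => check i j) with
  | nil => rfl
  | cons a l =>
    rw [foldl_modify_batch (pyStrList i) (a :: l) (by simp) st.1]
    simp only [List.isEmpty_cons, if_neg (by simp : ¬ (false = true))]
    rfl

theorem path_request_eq (test_path primes : List (List Int))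
    (hpre : Pre_path_request test_path primes) :
    path_request test_path primes = path_request_alt test_path primes := by
  rcases hpre with rfl | hpr
  · rfl
  · unfold path_request path_request_alt
    apply congrArg PySem.Dict.items
    have outer : ∀ (tp : List (List Int))
        (st : PySem.Dict String (List (List Int)) × PySem.Dict String (List (List Int))),
        (tp.foldl
          (fun st i =>
            primes.foldl
              (fun st j =>
                if check i j then
                  (st.1.modify (pyStrList i) [] (· ++ [j]), st.2.modify (pyStrList j) [] (· ++ [i]))
                else st)
              st)
          st).1
        = tp.foldl
            (fun d path =>
              let ms := primes.filter (fun p =>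
                ((windowsDict path (PySem.Set.ofList (primes.map (fun p => p.length)))).getD p.length
                  PySem.Set.empty).contains p)
              if ms.isEmpty then d
              else d.insert (pyStrList path) (d.getD (pyStrList path) [] ++ ms))
            st.1 := by
      intro tp
      induction tp with
      | nil => intro st; rfl
      | cons i tps ih =>
        intro st
        simp only [List.foldl_cons]
        rw [ih]
        exact congrArg
          (fun X => List.foldl
            (fun d path =>
              let ms := primes.filter (fun p =>
                ((windowsDict path (PySem.Set.ofList (primes.map (fun p => p.length)))).getD p.length
                  PySem.Set.empty).contains p)
              if ms.isEmpty then d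
              else d.insert (pyStrList path) (d.getD (pyStrList path) [] ++ ms))
            X tps)
          (inner_eq primes hpr i st)
    exact outer test_path (PySem.Dict.empty, PySem.Dict.empty)

-- ===== VERDICT (by name: the statement is the Claim_ definition above) =====
theorem path_request_spec : Claim_equal_path_request := by
  intro tp pr _ hpre
  exact path_request_eq tp pr hpre
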